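-- pv_equiv track=rewrite | github.com/jaseok75/YU | DongBright/Sort/안테나.py | left_min
-- ===== SOURCE A (Python) =====
-- def distance(array, target):
--     result = 0
--     for house in array:
--         result += abs(house - target)
--     return result
--
-- def left_min(array, target, mid_distance):
--     result = mid_distance
--     while target >= 0:
--         target -= 1
--         cal_distance = distance(array, array[target])
--         if result < cal_distance:
--             return target + 1
--         else:
--             result = cal_distance
--     return target
-- ===== SOURCE B (Python) =====
-- def left_min(array, target, mid_distance):
--     zs = sorted(array)
--     n = len(zs)
--     prefix = [0] * (n + 1)
--     for i in range(n):
--         prefix[i + 1] = prefix[i] + zs[i]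
--     total = prefix[n]
--
--     def bisect_right(x):
--         lo, hi = 0, n
--         while lo < hi:
--             mid = (lo + hi) // 2
--             if x < zs[mid]:
--                 hi = mid
--             else:
--                 lo = mid + 1
--         return lo
--
--     def query(x):
--         k = bisect_right(x)
--         return k * x - prefix[k] + (total - prefix[k]) - (n - k) * x
--
--     result = mid_distance
--     while target >= 0:
--         target -= 1
--         cal = query(array[target])
--         if result < cal:
--             return target + 1
--         result = cal
--     return target
-- ===== Notes on version B (the rewrite author's own statement) =====
-- stated objective: faster
-- what changed: B sorts a copy of the array once and builds prefix sums, so each absolute-distance sum is answered with a binary search in O(log n) instead of A's full O(n) scan per step.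
import Mathlib
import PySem

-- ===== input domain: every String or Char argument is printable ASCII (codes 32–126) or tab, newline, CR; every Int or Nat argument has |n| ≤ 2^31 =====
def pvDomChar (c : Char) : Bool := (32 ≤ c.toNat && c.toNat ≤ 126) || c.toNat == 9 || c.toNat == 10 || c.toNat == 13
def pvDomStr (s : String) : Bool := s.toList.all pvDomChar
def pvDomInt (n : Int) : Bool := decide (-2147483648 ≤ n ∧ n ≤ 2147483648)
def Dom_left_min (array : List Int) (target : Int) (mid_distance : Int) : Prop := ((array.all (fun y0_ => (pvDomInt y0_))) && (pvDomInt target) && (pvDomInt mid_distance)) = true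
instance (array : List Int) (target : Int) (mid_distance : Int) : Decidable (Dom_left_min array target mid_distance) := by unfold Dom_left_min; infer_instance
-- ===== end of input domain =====

-- B replaces A's O(n) distance scan per step by a sorted copy + prefix sums answering each
-- distance query with one binary search (asymptotically faster).

-- ===== PORT A =====
def pvDistance (array : List Int) (target : Int) : Int :=
  array.foldl (fun result house => result + |house - target|) 0

def pvLoopA (array : List Int) (target result : Int) : Int :=
  if h : 0 ≤ target then
    match PySem.List.pyGet? array (target - 1) with
    | none => 0   -- IndexError in Python; excluded by Pre_left_min
    | some v =>
      if result < pvDistance array v then (target - 1) + 1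
      else pvLoopA array (target - 1) (pvDistance array v)
  else target
termination_by (target + 1).toNat
decreasing_by omega

def left_min (array : List Int) (target : Int) (mid_distance : Int) : Int :=
  pvLoopA array target mid_distance

-- ===== PORT B =====
def pvPrefix (acc : Int) : List Int → List Int
  | [] => [acc]
  | z :: r => acc :: pvPrefix (acc + z) r

-- Source B's hand-written bisect_right loop is exactly PySem.List.bisectRight's lo/hi loop
def pvQuery (zs ps : List Int) (total : Int) (n : Nat) (x : Int) : Int :=
  let k := PySem.List.bisectRight zs x
  (k : Int) * x - ps.getD k 0 + (total - ps.getD k 0) - ((n : Int) - (k : Int)) * x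

def pvLoopB (array zs ps : List Int) (total : Int) (n : Nat) (target result : Int) : Int :=
  if h : 0 ≤ target then
    match PySem.List.pyGet? array (target - 1) with
    | none => 0   -- IndexError in Python; excluded by Pre_left_min
    | some v =>
      if result < pvQuery zs ps total n v then (target - 1) + 1
      else pvLoopB array zs ps total n (target - 1) (pvQuery zs ps total n v)
  else target
termination_by (target + 1).toNat
decreasing_by omega

def left_min_alt (array : List Int) (target : Int) (mid_distance : Int) : Int :=
  let zs := PySem.List.sorted array (fun z => z) false
  let ps := pvPrefix 0 zs
  pvLoopB array zs ps (ps.getD zs.length 0) zs.length target mid_distance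

-- ===== PRECONDITION & SPEC =====
-- Pre_ excludes exactly the inputs on which A raises IndexError: a nonnegative start index
-- into an empty array, or a start index exceeding the array length.
def Pre_left_min (array : List Int) (target : Int) (mid_distance : Int) : Prop :=
  target < 0 ∨ (array ≠ [] ∧ target ≤ array.length)
instance (array : List Int) (target : Int) (mid_distance : Int) : Decidable (Pre_left_min array target mid_distance) := by unfold Pre_left_min; infer_instance

def pvWitness_left_min : List Int × Int × Int := ([1, 3, 5], 2, 100)

def Spec_left_min (array : List Int) (target : Int) (mid_distance : Int) (out : Int) : Prop := out = left_min_alt array target mid_distance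
instance (array : List Int) (target : Int) (mid_distance : Int) (out : Int) : Decidable (Spec_left_min array target mid_distance out) := by unfold Spec_left_min; infer_instance

-- ===== CLAIM (what is proved, stated in full; the proofs are below) =====
def Claim_equal_left_min : Prop := ∀ (array : List Int) (target : Int) (mid_distance : Int), Dom_left_min array target mid_distance → Pre_left_min array target mid_distance → Spec_left_min array target mid_distance (left_min array target mid_distance)

-- ===== LEMMAS AND PROOFS =====

theorem pvPrefix_getD (zs : List Int) : ∀ (acc : Int) (k : Nat), k ≤ zs.length →
    (pvPrefix acc zs).getD k 0 = acc + (zs.take k).sum := by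
  induction zs with
  | nil =>
    intro acc k hk
    have : k = 0 := Nat.le_zero.mp hk
    subst this; simp [pvPrefix]
  | cons z r ih =>
    intro acc k hk
    cases k with
    | zero => simp [pvPrefix]
    | succ k =>
      simp only [pvPrefix, List.getD_cons_succ, List.take_succ_cons, List.sum_cons]
      rw [ih (acc + z) k (by simpa using hk)]; ring

theorem pvDistance_foldl (x : Int) (l : List Int) : ∀ (r : Int),
    l.foldl (fun result house => result + |house - x|) r = r + (l.map (fun h => |h - x|)).sum := by
  induction l with
  | nil => simp
  | cons a t ih =>
    intro r
    simp only [List.foldl_cons, List.map_cons, List.sum_cons, ih]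
    ring

theorem pvDistance_eq_sum (array : List Int) (x : Int) :
    pvDistance array x = (array.map (fun h => |h - x|)).sum := by
  unfold pvDistance
  rw [pvDistance_foldl]; ring

theorem sum_abs_le (l : List Int) (x : Int) (h : ∀ z ∈ l, z ≤ x) :
    (l.map (fun h => |h - x|)).sum = (l.length : Int) * x - l.sum := by
  induction l with
  | nil => simp
  | cons a r ih =>
    have ha : a ≤ x := h a (by simp)
    simp only [List.map_cons, List.sum_cons, List.length_cons]
    rw [ih (fun z hz => h z (by simp [hz])), abs_of_nonpos (by omega)]
    push_cast; ring

theorem sum_abs_gt (l : List Int) (x : Int) (h : ∀ z ∈ l, x < z) :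
    (l.map (fun h => |h - x|)).sum = l.sum - (l.length : Int) * x := by
  induction l with
  | nil => simp
  | cons a r ih =>
    have ha : x < a := h a (by simp)
    simp only [List.map_cons, List.sum_cons, List.length_cons]
    rw [ih (fun z hz => h z (by simp [hz])), abs_of_nonneg (by omega)]
    push_cast; ring

theorem pvQuery_eq_distance (array : List Int) (x : Int) :
    pvQuery (PySem.List.sorted array (fun z => z) false)
      (pvPrefix 0 (PySem.List.sorted array (fun z => z) false))
      ((pvPrefix 0 (PySem.List.sorted array (fun z => z) false)).getD
        (PySem.List.sorted array (fun z => z) false).length 0)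
      (PySem.List.sorted array (fun z => z) false).length x
    = pvDistance array x := by
  set zs := PySem.List.sorted array (fun z => z) false with hzs
  set n := zs.length with hn
  set k := PySem.List.bisectRight zs x with hk
  have hp : zs.Pairwise (· ≤ ·) := PySem.List.sorted_pairwise array (fun z => z)
  obtain ⟨hkn, hle, hgt⟩ := PySem.List.bisectRight_spec zs x hp
  have htake : ∀ z ∈ zs.take k, z ≤ x := by
    intro z hz
    obtain ⟨i, hi, hzi⟩ := List.mem_iff_getElem.mp hz
    have hi' : i < k := lt_of_lt_of_le hi (by simp)
    have hil : i < zs.length := lt_of_lt_of_le hi' hkn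
    have := hle i hil hi'
    rwa [← hzi, List.getElem_take]
  have hdrop : ∀ z ∈ zs.drop k, x < z := by
    intro z hz
    obtain ⟨i, hi, hzi⟩ := List.mem_iff_getElem.mp hz
    have hil : k + i < zs.length := by simp at hi; omega
    have := hgt (k + i) hil (by omega)
    rwa [← hzi, List.getElem_drop]
  have hlen_take : (zs.take k).length = k := List.length_take_of_le hkn
  have hlen_drop : (zs.drop k).length = n - k := by simp [hn]
  have hsplit : (zs.map (fun h => |h - x|)).sum
      = ((zs.take k).map (fun h => |h - x|)).sum + ((zs.drop k).map (fun h => |h - x|)).sum := by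
    conv_lhs => rw [← List.take_append_drop k zs]
    rw [List.map_append, List.sum_append]
  have hsum_split : (zs.take k).sum + (zs.drop k).sum = zs.sum := by
    conv_rhs => rw [← List.take_append_drop k zs]
    rw [List.sum_append]
  have hperm : (array.map (fun h => |h - x|)).sum = (zs.map (fun h => |h - x|)).sum :=
    (((PySem.List.sorted_perm array (fun z => z) false).map _).sum_eq).symm
  rw [pvDistance_eq_sum, hperm, hsplit, sum_abs_le _ _ htake, sum_abs_gt _ _ hdrop]
  show (k : Int) * x - (pvPrefix 0 zs).getD k 0 + ((pvPrefix 0 zs).getD n 0 - (pvPrefix 0 zs).getD k 0) - ((n : Int) - (k : Int)) * x = _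
  rw [pvPrefix_getD zs 0 k hkn, pvPrefix_getD zs 0 n (le_refl _),
    List.take_length, hlen_take, hlen_drop]
  have hkn' : k ≤ n := hkn
  have hc : ((n - k : Nat) : Int) = (n : Int) - (k : Int) := by omega
  rw [hc]
  have := hsum_split
  omega

theorem pvLoop_eq (array zs ps : List Int) (total : Int) (n : Nat)
    (hq : ∀ x, pvQuery zs ps total n x = pvDistance array x) :
    ∀ (N : Nat) (target result : Int), (target + 1).toNat ≤ N →
    pvLoopB array zs ps total n target result = pvLoopA array target result := by
  intro N
  induction N with
  | zero =>
    intro target result hN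
    have ht : target < 0 := by omega
    rw [pvLoopB, pvLoopA]; simp [not_le.mpr ht]
  | succ N ih =>
    intro target result hN
    rw [pvLoopB, pvLoopA]
    by_cases h : 0 ≤ target
    · simp only [h, dite_true]
      cases PySem.List.pyGet? array (target - 1) with
      | none => rfl
      | some v =>
        simp only [hq]
        by_cases hr : result < pvDistance array v
        · simp [hr]
        · simp only [hr, if_false]
          exact ih (target - 1) (pvDistance array v) (by omega)
    · simp [h]

-- ===== VERDICT (by name: the statement is the Claim_ definition above) =====
theorem left_min_spec : Claim_equal_left_min := by
  intro array target mid_distance _ _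
  unfold Spec_left_min left_min left_min_alt
  exact (pvLoop_eq array _ _ _ _ (fun x => pvQuery_eq_distance array x)
    (target + 1).toNat target mid_distance (le_refl _)).symm
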